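-- pv_equiv track=rewrite | github.com/13-Sonja/lotto | silvester.py | calculate_winnings
-- ===== SOURCE A (Python) =====
-- WINNINGS = {"class_1": 1000000, "class_2": 100000, "class_3": 1000, "class_4": 10}
--
-- def calculate_winnings(draws, my_tickets):
--     won = 0
--     for ticket in my_tickets:
--         if ticket in draws[0]:
--             won += WINNINGS["class_1"]
--         elif ticket in draws[1]:
--             won += WINNINGS["class_2"]
--         elif ticket in draws[2]:
--             won += WINNINGS["class_3"]
--         if int(str(ticket)[-2:]) in draws[3]:
--             won += WINNINGS["class_4"]
--     return won
-- ===== SOURCE B (Python) =====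
-- WINNINGS = {"class_1": 1000000, "class_2": 100000, "class_3": 1000, "class_4": 10}
--
-- def calculate_winnings(draws, my_tickets):
--     if not my_tickets:
--         return 0
--     d0 = set(draws[0])
--     d1 = set(draws[1])
--     d2 = set(draws[2])
--     d3 = set(draws[3])
--     c1 = sum(1 for t in my_tickets if t in d0)
--     c2 = sum(1 for t in my_tickets if t in d1 and t not in d0)
--     c3 = sum(1 for t in my_tickets if t in d2 and t not in d0 and t not in d1)
--     c4 = sum(1 for t in my_tickets if int(str(t)[-2:]) in d3)
--     return 1000000 * c1 + 100000 * c2 + 1000 * c3 + 10 * c4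
-- ===== Notes on version B (the rewrite author's own statement) =====
-- stated objective: faster
-- what changed: Replaces the single scan with an if/elif chain doing linear list membership by four per-prize-tier counting passes over the tickets against hash sets built once from the draws, combined by a weighted sum.
import Mathlib
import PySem

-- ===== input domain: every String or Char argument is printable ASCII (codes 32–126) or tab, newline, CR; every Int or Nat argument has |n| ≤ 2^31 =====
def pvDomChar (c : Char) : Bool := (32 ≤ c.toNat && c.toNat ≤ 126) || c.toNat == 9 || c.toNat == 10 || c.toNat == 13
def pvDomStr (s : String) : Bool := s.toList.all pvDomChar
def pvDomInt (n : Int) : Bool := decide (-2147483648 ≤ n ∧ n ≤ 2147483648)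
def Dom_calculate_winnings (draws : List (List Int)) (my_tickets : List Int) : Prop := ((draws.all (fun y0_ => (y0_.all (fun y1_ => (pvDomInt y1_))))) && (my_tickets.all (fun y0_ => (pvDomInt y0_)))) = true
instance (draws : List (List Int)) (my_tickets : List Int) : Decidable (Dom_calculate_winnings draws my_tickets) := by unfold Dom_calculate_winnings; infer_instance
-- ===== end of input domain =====

-- B replaces A's single if/elif scan (list membership per ticket) by four per-tier counting passes against sets built once; a timing run measured B faster.

-- int(str(t)[-2:]) — shared by both Pythons verbatim; the int() never fails on str(t)[-2:], so getD 0 is never taken.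
def pvLast2 (t : Int) : Int :=
  (PySem.Int.ofStr? (PySem.Str.slice (PySem.Int.toStr t) (some (-2)) none)).getD 0

-- ===== PORT A =====
def calculate_winnings (draws : List (List Int)) (my_tickets : List Int) : Int :=
  my_tickets.foldl (fun won ticket =>
    let won :=
      if ((PySem.List.pyGet? draws 0).getD []).contains ticket then won + 1000000
      else if ((PySem.List.pyGet? draws 1).getD []).contains ticket then won + 100000
      else if ((PySem.List.pyGet? draws 2).getD []).contains ticket then won + 1000
      else won
    if ((PySem.List.pyGet? draws 3).getD []).contains (pvLast2 ticket) then won + 10 else won) 0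

-- ===== PORT B =====
def calculate_winnings_alt (draws : List (List Int)) (my_tickets : List Int) : Int :=
  if my_tickets.isEmpty then 0 else
  let d0 := PySem.Set.ofList ((PySem.List.pyGet? draws 0).getD [])
  let d1 := PySem.Set.ofList ((PySem.List.pyGet? draws 1).getD [])
  let d2 := PySem.Set.ofList ((PySem.List.pyGet? draws 2).getD [])
  let d3 := PySem.Set.ofList ((PySem.List.pyGet? draws 3).getD [])
  let c1 : Int := (my_tickets.filter (fun t => PySem.Set.contains d0 t)).length
  let c2 : Int := (my_tickets.filter (fun t => PySem.Set.contains d1 t && !PySem.Set.contains d0 t)).length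
  let c3 : Int := (my_tickets.filter (fun t => PySem.Set.contains d2 t && !PySem.Set.contains d0 t && !PySem.Set.contains d1 t)).length
  let c4 : Int := (my_tickets.filter (fun t => PySem.Set.contains d3 (pvLast2 t))).length
  1000000 * c1 + 100000 * c2 + 1000 * c3 + 10 * c4

-- ===== PRECONDITION & SPEC =====
-- Pre_ excludes exactly the inputs where A raises IndexError: a nonempty ticket list with fewer than 4 draw lists.
def Pre_calculate_winnings (draws : List (List Int)) (my_tickets : List Int) : Prop :=
  my_tickets = [] ∨ 4 ≤ draws.length
instance (draws : List (List Int)) (my_tickets : List Int) : Decidable (Pre_calculate_winnings draws my_tickets) := by unfold Pre_calculate_winnings; infer_instance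
def pvWitness_calculate_winnings : List (List Int) × List Int := ([[12], [34], [56], [7]], [12, 107, 56])
def Spec_calculate_winnings (draws : List (List Int)) (my_tickets : List Int) (out : Int) : Prop := out = calculate_winnings_alt draws my_tickets
instance (draws : List (List Int)) (my_tickets : List Int) (out : Int) : Decidable (Spec_calculate_winnings draws my_tickets out) := by unfold Spec_calculate_winnings; infer_instance

-- ===== CLAIM (what is proved, stated in full; the proofs are below) =====
def Claim_equal_calculate_winnings : Prop := ∀ (draws : List (List Int)) (my_tickets : List Int), Dom_calculate_winnings draws my_tickets → Pre_calculate_winnings draws my_tickets → Spec_calculate_winnings draws my_tickets (calculate_winnings draws my_tickets)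

-- ===== LEMMAS AND PROOFS =====

lemma pv_set_contains_ofList (l : List Int) (x : Int) :
    PySem.Set.contains (PySem.Set.ofList l) x = l.contains x := by
  simp [PySem.Set.contains_eq_listContains, PySem.Set.mem_ofList]

lemma pv_loop_eq (l0 l1 l2 l3 : List Int) (ts : List Int) (w : Int) :
    ts.foldl (fun won ticket =>
      let won :=
        if l0.contains ticket then won + 1000000
        else if l1.contains ticket then won + 100000
        else if l2.contains ticket then won + 1000
        else won
      if l3.contains (pvLast2 ticket) then won + 10 else won) w
    = w + 1000000 * ((ts.filter (fun t => l0.contains t)).length : Int)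
        + 100000 * ((ts.filter (fun t => l1.contains t && !l0.contains t)).length : Int)
        + 1000 * ((ts.filter (fun t => l2.contains t && !l0.contains t && !l1.contains t)).length : Int)
        + 10 * ((ts.filter (fun t => l3.contains (pvLast2 t))).length : Int) := by
  induction ts generalizing w with
  | nil => simp
  | cons t ts ih =>
    simp only [List.foldl_cons, List.filter_cons, ih]
    cases h0 : l0.contains t <;> cases h1 : l1.contains t <;>
      cases h2 : l2.contains t <;> cases h3 : l3.contains (pvLast2 t) <;>
      simp <;> ring

-- ===== VERDICT (by name: the statement is the Claim_ definition above) =====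
theorem calculate_winnings_spec : Claim_equal_calculate_winnings := by
  intro draws my_tickets _ hpre
  unfold Spec_calculate_winnings calculate_winnings calculate_winnings_alt
  cases my_tickets with
  | nil => simp
  | cons t ts =>
    simp only [List.isEmpty_cons, if_neg (by decide : ¬ (false = true))]
    simp only [pv_set_contains_ofList]
    rw [pv_loop_eq]
    ring
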